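-- pv_equiv track=rewrite | github.com/SchwartzCode/CMU_15-110__Principles_of_Computing | hw5/hw5.py | mapFileToCount
-- ===== SOURCE A (Python) =====
-- def mapFileToCount(s):
--     s.splitlines()    #splitting at new lines
--     temp = s.split()  #splitting at spaces
--
--     capital_count = 0
--     #loop through all words and tally capital first letters
--     for word in temp:
--         ascii_code = ord(word[0])
--         if (ascii_code > 64) and (ascii_code < 91):
--             capital_count += 1
--     return capital_count
-- ===== SOURCE B (Python) =====
-- def mapFileToCount(s):
--     capital_count = 0
--     at_word_start = True
--     for char in s:
--         if char.isspace():
--             at_word_start = True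
--         else:
--             if at_word_start and 64 < ord(char) < 91:
--                 capital_count += 1
--             at_word_start = False
--     return capital_count
-- ===== Notes on version B (the rewrite author's own statement) =====
-- stated objective: alternative
-- what changed: Drops the dead splitlines() call and replaces building a word list via split() with a single character scan maintaining a word-start flag; it allocates no intermediate list but trades away CPython's C-level split, so no speed is claimed.
import Mathlib
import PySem

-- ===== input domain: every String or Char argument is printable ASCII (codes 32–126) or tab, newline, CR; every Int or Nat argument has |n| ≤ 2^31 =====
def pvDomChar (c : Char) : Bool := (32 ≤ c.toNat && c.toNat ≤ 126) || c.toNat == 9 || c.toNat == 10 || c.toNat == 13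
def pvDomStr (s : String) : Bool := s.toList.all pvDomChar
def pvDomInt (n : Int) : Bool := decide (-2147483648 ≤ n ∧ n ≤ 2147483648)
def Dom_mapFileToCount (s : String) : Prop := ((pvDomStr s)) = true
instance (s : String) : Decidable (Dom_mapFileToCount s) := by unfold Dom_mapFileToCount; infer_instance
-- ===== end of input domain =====

-- B replaces split()-then-tally by a single character scan with a word-start flag (no word list built); same O(n) cost, no speed claimed.

-- ===== PORT A =====
def mapFileToCount (s : String) : Int :=
  let _lines := PySem.Chars.splitlines s.toList   -- s.splitlines() : computed and discarded, as in A
  let temp := PySem.Chars.split₀ s.toList         -- s.split()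
  temp.foldl (fun capital_count word =>
    match PySem.List.pyGet? word 0 with           -- ord(word[0]); words from split() are nonempty
    | some c => if 64 < c.toNat ∧ c.toNat < 91 then capital_count + 1 else capital_count
    | none => capital_count) 0

-- ===== PORT B =====
def mapFileToCountGo : List Char → Bool → Int → Int
  | [], _, capital_count => capital_count
  | c :: rest, at_word_start, capital_count =>
    if PySem.Chars.isspace c then
      mapFileToCountGo rest true capital_count
    else
      mapFileToCountGo rest false
        (if at_word_start ∧ 64 < c.toNat ∧ c.toNat < 91 then capital_count + 1 else capital_count)

def mapFileToCount_alt (s : String) : Int :=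
  mapFileToCountGo s.toList true 0

-- ===== PRECONDITION & SPEC =====
def Spec_mapFileToCount (s : String) (out : Int) : Prop := out = mapFileToCount_alt s
instance (s : String) (out : Int) : Decidable (Spec_mapFileToCount s out) := by unfold Spec_mapFileToCount; infer_instance

-- ===== CLAIM (what is proved, stated in full; the proofs are below) =====
def Claim_equal_mapFileToCount : Prop := ∀ (s : String), Dom_mapFileToCount s → Spec_mapFileToCount s (mapFileToCount s)

-- ===== LEMMAS AND PROOFS =====

-- contribution of one word to A's tally
def pvF (w : List Char) : Int :=
  match PySem.List.pyGet? w 0 with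
  | some c => if 64 < c.toNat ∧ c.toNat < 91 then 1 else 0
  | none => 0

lemma pvF_cons (c : Char) (w : List Char) :
    pvF (c :: w) = if 64 < c.toNat ∧ c.toNat < 91 then 1 else 0 := by
  simp [pvF, PySem.List.pyGet?, PySem.List.pyIdx?]

lemma pvF_append_last (cur : List Char) (c : Char) (h : cur ≠ []) :
    pvF (cur ++ [c]) = pvF cur := by
  cases cur with
  | nil => exact absurd rfl h
  | cons x xs => simp [pvF_cons]

lemma foldlA_eq_sum (ws : List (List Char)) (cc : Int) :
    ws.foldl (fun capital_count word =>
      match PySem.List.pyGet? word 0 with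
      | some c => if 64 < c.toNat ∧ c.toNat < 91 then capital_count + 1 else capital_count
      | none => capital_count) cc = cc + (ws.map pvF).sum := by
  induction ws generalizing cc with
  | nil => simp
  | cons w ws ih =>
    simp only [List.foldl_cons, List.map_cons, List.sum_cons, ih]
    unfold pvF
    cases PySem.List.pyGet? w 0 with
    | none => ring
    | some c => dsimp only; split_ifs <;> ring

-- remaining tally of split₀.go, with accumulator peeled off
def pvT (cs cur : List Char) : Int := ((PySem.Chars.split₀.go cs cur []).map pvF).sum

lemma splitGo_acc (cs cur : List Char) (acc : List (List Char)) :
    ((PySem.Chars.split₀.go cs cur acc).map pvF).sum = (acc.map pvF).sum + pvT cs cur := by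
  induction cs generalizing cur acc with
  | nil =>
    by_cases h : cur.isEmpty <;>
      simp [pvT, PySem.Chars.split₀.go, h, List.sum_reverse, add_comm]
  | cons c rest ih =>
    by_cases hs : PySem.Chars.isspace c
    · by_cases h : cur.isEmpty
      · simp only [pvT, PySem.Chars.split₀.go, hs, h, if_true]
        rw [ih]
        simp [pvT]
      · simp only [pvT, PySem.Chars.split₀.go, hs, h, if_true, Bool.false_eq_true, ite_false]
        rw [ih, ih _ [cur.reverse]]
        simp only [List.map_cons, List.map_nil, List.sum_cons, List.sum_nil]
        ring
    · simp only [pvT, PySem.Chars.split₀.go, hs, Bool.false_eq_true, ite_false]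
      rw [ih, ih _ []]
      simp

lemma go_spec (cs : List Char) :
    (∀ cc : Int, mapFileToCountGo cs true cc = cc + pvT cs []) ∧
    (∀ (cur : List Char) (cc : Int), cur ≠ [] →
      mapFileToCountGo cs false cc = cc + pvT cs cur - pvF cur.reverse) := by
  induction cs with
  | nil =>
    refine ⟨fun cc => by simp [mapFileToCountGo, pvT, PySem.Chars.split₀.go],
            fun cur cc h => ?_⟩
    have hne : cur.isEmpty = false := by simpa using h
    simp [mapFileToCountGo, pvT, PySem.Chars.split₀.go, hne, pvF]
  | cons c rest ih =>
    constructor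
    · intro cc
      by_cases hs : PySem.Chars.isspace c
      · simp only [mapFileToCountGo, hs, if_true]
        rw [ih.1]
        simp [pvT, PySem.Chars.split₀.go, hs]
      · simp only [mapFileToCountGo, hs, Bool.false_eq_true, ite_false, true_and]
        rw [ih.2 [c] _ (by simp)]
        have hT : pvT (c :: rest) [] = pvT rest [c] := by
          simp [pvT, PySem.Chars.split₀.go, hs]
        rw [hT]
        have : pvF [c].reverse = if 64 < c.toNat ∧ c.toNat < 91 then 1 else 0 := by
          simp [pvF_cons]
        rw [this]
        split_ifs <;> ring
    · intro cur cc h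
      have hne : cur.isEmpty = false := by simpa using h
      by_cases hs : PySem.Chars.isspace c
      · simp only [mapFileToCountGo, hs, if_true]
        rw [ih.1]
        have : pvT (c :: rest) cur = pvF cur.reverse + pvT rest [] := by
          simp only [pvT, PySem.Chars.split₀.go, hs, hne, if_true, Bool.false_eq_true, ite_false]
          rw [splitGo_acc]
          simp [pvT]
        rw [this]; ring
      · simp only [mapFileToCountGo, hs, Bool.false_eq_true, ite_false, false_and]
        rw [ih.2 (c :: cur) _ (by simp)]
        have hT : pvT (c :: rest) cur = pvT rest (c :: cur) := by
          simp [pvT, PySem.Chars.split₀.go, hs]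
        have hF : pvF (c :: cur).reverse = pvF cur.reverse := by
          simp only [List.reverse_cons]
          exact pvF_append_last _ c (by simpa using h)
        rw [hT, hF]

-- ===== VERDICT (by name: the statement is the Claim_ definition above) =====
theorem mapFileToCount_spec : Claim_equal_mapFileToCount := by
  intro s _
  unfold Spec_mapFileToCount mapFileToCount mapFileToCount_alt
  rw [foldlA_eq_sum]
  rw [(go_spec s.toList).1 0]
  simp [pvT, PySem.Chars.split₀]
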